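-- pv_equiv track=rewrite | github.com/rednuht/aoc_2020 | day14/main.py | memory_address_combinations
-- ===== SOURCE A (Python) =====
-- import itertools
--
-- def memory_address_combinations(number):
--     floating_indices = []
--     for i, c in enumerate(number):
--         if c == 'X':
--             floating_indices.append(i)
--
--     for combinations in list(itertools.product([0, 1], repeat=len(floating_indices))):
--         new_number = number
--         for binary_value in combinations:
--             new_number = new_number.replace('X', str(binary_value), 1)
--         yield new_number
-- ===== SOURCE B (Python) =====
-- def memory_address_combinations(number):
--     # single left-to-right pass extending all prefixes; 'X' forks each prefix into '0' then '1'
--     results = ['']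
--     for c in number:
--         if c == 'X':
--             results = [t + b for t in results for b in '01']
--         else:
--             results = [t + c for t in results]
--     yield from results
-- ===== Notes on version B (the rewrite author's own statement) =====
-- stated objective: simpler
-- what changed: Replaces the floating-index scan plus itertools.product plus repeated single-occurrence replace passes with one left-to-right pass that extends every prefix per character, forking each prefix into both bits at a wildcard.
import Mathlib
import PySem

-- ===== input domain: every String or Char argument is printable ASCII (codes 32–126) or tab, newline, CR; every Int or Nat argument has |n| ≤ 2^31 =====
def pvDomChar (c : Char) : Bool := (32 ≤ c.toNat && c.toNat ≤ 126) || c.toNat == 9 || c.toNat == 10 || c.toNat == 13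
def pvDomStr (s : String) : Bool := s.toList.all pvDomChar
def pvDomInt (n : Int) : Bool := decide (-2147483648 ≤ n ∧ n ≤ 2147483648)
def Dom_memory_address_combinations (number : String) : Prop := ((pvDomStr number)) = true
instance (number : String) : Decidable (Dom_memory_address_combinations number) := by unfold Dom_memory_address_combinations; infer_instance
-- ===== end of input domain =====

-- B replaces the index scan + itertools.product + repeated single-occurrence replace with one
-- left-to-right prefix-extending pass; both are generators, compared by their yielded sequence.

-- ===== PORT A =====
-- s.replace('X', r, 1): replace the first 'X' only (hand port, exact: no 'X' => unchanged)
def pvReplace1 (s : List Char) (r : List Char) : List Char :=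
  match s with
  | [] => []
  | c :: cs => if c = 'X' then r ++ cs else c :: pvReplace1 cs r

-- itertools.product([0,1], repeat=k) (last slot varies fastest)
def pvProdRep : Nat → List (List Int)
  | 0 => [[]]
  | k + 1 => (pvProdRep k).map (fun t => (0 : Int) :: t) ++ (pvProdRep k).map (fun t => (1 : Int) :: t)

def memory_address_combinations (number : String) : List String :=
  let floating_indices :=
    (PySem.List.enumerate number.toList).foldl
      (fun acc ic => if ic.2 = 'X' then acc ++ [ic.1] else acc) ([] : List Int)
  (pvProdRep floating_indices.length).map (fun combinations =>
    String.ofList (combinations.foldl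
      (fun new_number binary_value => pvReplace1 new_number (PySem.Int.toStr binary_value).toList)
      number.toList))

-- ===== PORT B =====
def pvStep (results : List (List Char)) (c : Char) : List (List Char) :=
  if c = 'X' then results.flatMap (fun t => (['0', '1'] : List Char).map (fun b => t ++ [b]))
  else results.map (fun t => t ++ [c])

def memory_address_combinations_alt (number : String) : List String :=
  (number.toList.foldl pvStep [([] : List Char)]).map String.ofList

-- ===== PRECONDITION & SPEC =====
def Spec_memory_address_combinations (number : String) (out : List String) : Prop := out = memory_address_combinations_alt number
instance (number : String) (out : List String) : Decidable (Spec_memory_address_combinations number out) := by unfold Spec_memory_address_combinations; infer_instance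

-- ===== CLAIM (what is proved, stated in full; the proofs are below) =====
def Claim_equal_memory_address_combinations : Prop := ∀ (number : String), Dom_memory_address_combinations number → Spec_memory_address_combinations number (memory_address_combinations number)

-- ===== LEMMAS AND PROOFS =====

-- suffix-expansion helper used only by the proofs
def pvAlt : List Char → List (List Char)
  | [] => [[]]
  | c :: cs =>
    let rest := pvAlt cs
    if c = 'X' then rest.map ('0' :: ·) ++ rest.map ('1' :: ·)
    else rest.map (c :: ·)

theorem pvStep_foldl (l : List Char) (rs : List (List Char)) :
    l.foldl pvStep rs = rs.flatMap (fun t => (pvAlt l).map (t ++ ·)) := by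
  induction l generalizing rs with
  | nil => simp [pvAlt]
  | cons c cs ih =>
    rw [List.foldl_cons, ih]
    by_cases hc : c = 'X'
    · subst hc
      rw [show pvStep rs 'X'
            = rs.flatMap (fun t => (['0', '1'] : List Char).map (fun b => t ++ [b])) from if_pos rfl,
          List.flatMap_assoc]
      refine List.flatMap_congr ?_
      intro t _
      simp [pvAlt, List.map_map, Function.comp_def, List.append_assoc]
    · rw [show pvStep rs c = rs.map (fun t => t ++ [c]) from if_neg hc, List.flatMap_map]
      refine List.flatMap_congr ?_
      intro t _
      simp [pvAlt, hc, List.map_map, Function.comp_def, List.append_assoc]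

theorem pvAlt_foldl (l : List Char) : l.foldl pvStep [([] : List Char)] = pvAlt l := by
  rw [pvStep_foldl]; simp

-- length of A's floating_indices accumulator = count of 'X'
theorem pvFi_length (l : List (Int × Char)) (acc : List Int) :
    (l.foldl (fun acc ic => if ic.2 = 'X' then acc ++ [ic.1] else acc) acc).length
      = acc.length + (l.map (·.2)).count 'X' := by
  induction l generalizing acc with
  | nil => simp
  | cons p l ih =>
    simp only [List.foldl_cons, List.map_cons]
    by_cases h : p.2 = 'X'
    · simp [h, ih]; omega
    · simp [h, ih]

theorem foldl_replace1_cons (c : Char) (hc : c ≠ 'X') (cs : List Char) (bs : List Int) :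
    bs.foldl (fun s b => pvReplace1 s (PySem.Int.toStr b).toList) (c :: cs)
      = c :: bs.foldl (fun s b => pvReplace1 s (PySem.Int.toStr b).toList) cs := by
  induction bs generalizing cs with
  | nil => rfl
  | cons b bs ih =>
    simp only [List.foldl_cons, pvReplace1, if_neg hc]
    exact ih _

theorem pvMain (s : List Char) :
    (pvProdRep (s.count 'X')).map (fun bs =>
        bs.foldl (fun nn b => pvReplace1 nn (PySem.Int.toStr b).toList) s)
      = pvAlt s := by
  induction s with
  | nil => rfl
  | cons c cs ih =>
    by_cases hc : c = 'X'
    · subst hc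
      have hcnt : (('X' : Char) :: cs).count 'X' = cs.count 'X' + 1 := by
        simp
      rw [hcnt]
      show ((pvProdRep (cs.count 'X')).map (fun t => (0 : Int) :: t)
              ++ (pvProdRep (cs.count 'X')).map (fun t => (1 : Int) :: t)).map _ = _
      rw [List.map_append, List.map_map, List.map_map]
      have h0s : (PySem.Int.toStr 0).toList = ['0'] := by decide
      have h1s : (PySem.Int.toStr 1).toList = ['1'] := by decide
      have h0 : ∀ bs : List Int,
          ((0 : Int) :: bs).foldl (fun nn b => pvReplace1 nn (PySem.Int.toStr b).toList) ('X' :: cs)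
            = '0' :: bs.foldl (fun nn b => pvReplace1 nn (PySem.Int.toStr b).toList) cs := by
        intro bs
        have hr : pvReplace1 ('X' :: cs) (PySem.Int.toStr 0).toList = '0' :: cs := by
          rw [h0s]; simp [pvReplace1]
        simp only [List.foldl_cons, hr]
        exact foldl_replace1_cons '0' (by decide) cs bs
      have h1 : ∀ bs : List Int,
          ((1 : Int) :: bs).foldl (fun nn b => pvReplace1 nn (PySem.Int.toStr b).toList) ('X' :: cs)
            = '1' :: bs.foldl (fun nn b => pvReplace1 nn (PySem.Int.toStr b).toList) cs := by
        intro bs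
        have hr : pvReplace1 ('X' :: cs) (PySem.Int.toStr 1).toList = '1' :: cs := by
          rw [h1s]; simp [pvReplace1]
        simp only [List.foldl_cons, hr]
        exact foldl_replace1_cons '1' (by decide) cs bs
      calc ((pvProdRep (cs.count 'X')).map (fun t =>
              ((0 : Int) :: t).foldl (fun nn b => pvReplace1 nn (PySem.Int.toStr b).toList) ('X' :: cs)))
              ++ ((pvProdRep (cs.count 'X')).map (fun t =>
              ((1 : Int) :: t).foldl (fun nn b => pvReplace1 nn (PySem.Int.toStr b).toList) ('X' :: cs)))
          = ((pvProdRep (cs.count 'X')).map (fun t =>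
              '0' :: t.foldl (fun nn b => pvReplace1 nn (PySem.Int.toStr b).toList) cs))
              ++ ((pvProdRep (cs.count 'X')).map (fun t =>
              '1' :: t.foldl (fun nn b => pvReplace1 nn (PySem.Int.toStr b).toList) cs)) := by
            rw [List.map_congr_left (fun t _ => h0 t), List.map_congr_left (fun t _ => h1 t)]
        _ = ((pvProdRep (cs.count 'X')).map (fun bs =>
              bs.foldl (fun nn b => pvReplace1 nn (PySem.Int.toStr b).toList) cs)).map ('0' :: ·)
              ++ ((pvProdRep (cs.count 'X')).map (fun bs =>
              bs.foldl (fun nn b => pvReplace1 nn (PySem.Int.toStr b).toList) cs)).map ('1' :: ·) := by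
            rw [List.map_map, List.map_map]; rfl
        _ = (pvAlt cs).map ('0' :: ·) ++ (pvAlt cs).map ('1' :: ·) := by rw [ih]
        _ = pvAlt ('X' :: cs) := by simp [pvAlt]
    · have hcnt : (c :: cs).count 'X' = cs.count 'X' := by
        simp [hc]
      rw [hcnt]
      calc (pvProdRep (cs.count 'X')).map (fun bs =>
              bs.foldl (fun nn b => pvReplace1 nn (PySem.Int.toStr b).toList) (c :: cs))
          = (pvProdRep (cs.count 'X')).map (fun bs =>
              c :: bs.foldl (fun nn b => pvReplace1 nn (PySem.Int.toStr b).toList) cs) := by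
            exact List.map_congr_left (fun bs _ => foldl_replace1_cons c hc cs bs)
        _ = ((pvProdRep (cs.count 'X')).map (fun bs =>
              bs.foldl (fun nn b => pvReplace1 nn (PySem.Int.toStr b).toList) cs)).map (c :: ·) := by
            rw [List.map_map]; rfl
        _ = (pvAlt cs).map (c :: ·) := by rw [ih]
        _ = pvAlt (c :: cs) := by simp [pvAlt, hc]

-- ===== VERDICT (by name: the statement is the Claim_ definition above) =====
theorem memory_address_combinations_spec : Claim_equal_memory_address_combinations := by
  intro number _
  show _ = _
  unfold memory_address_combinations memory_address_combinations_alt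
  have hlen : ((PySem.List.enumerate number.toList).foldl
      (fun acc ic => if ic.2 = 'X' then acc ++ [ic.1] else acc) ([] : List Int)).length
        = number.toList.count 'X' := by
    rw [pvFi_length, PySem.List.map_snd_enumerate]; simp
  simp only [hlen]
  rw [pvAlt_foldl, ← pvMain number.toList, List.map_map]
  rfl
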